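-- pv_equiv track=rewrite | github.com/sunminky/algorythmStudy | 알고리즘 스터디/개인공부/SegmentTree/Median.py | inflate_tree
-- ===== SOURCE A (Python) =====
-- from math import log2, ceil
--
-- def inflate_tree(numbers) -> list:
--     height = ceil(log2(len(numbers)))
--     end_layer = 1 << height
--     tree = [list() for _ in range(2 << height)]
--
--     for seq, e in enumerate(numbers):
--         tree[end_layer + seq] = [e]
--
--     end_layer >>= 1
--     while end_layer:
--         for i in range(end_layer):
--             e1 = tree[(end_layer + i) << 1]
--             e2 = tree[((end_layer + i) << 1) + 1]
--             idx1 = 0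
--             idx2 = 0
--
--             # 병합 정렬 #
--             while idx1 < len(e1) and idx2 < len(e2):
--                 if e1[idx1] < e2[idx2]:
--                     tree[end_layer + i].append(e1[idx1])
--                     idx1 += 1
--                 else:
--                     tree[end_layer + i].append(e2[idx2])
--                     idx2 += 1
--
--             # 남은 요소 합쳐주기 #
--             for j in range(idx1, len(e1)):
--                 tree[end_layer + i].append(e1[j])
--
--             # 남은 요소 합쳐주기 #
--             for j in range(idx2, len(e2)):
--                 tree[end_layer + i].append(e2[j])
--
--         end_layer >>= 1
--
--     return tree
-- ===== SOURCE B (Python) =====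
-- from math import log2, ceil
--
-- def inflate_tree(numbers) -> list:
--     # each node's list is computed directly as the sorted slice of numbers it covers
--     height = ceil(log2(len(numbers)))
--     size = 1 << height
--     out = [[]]
--     for d in range(height + 1):
--         w = size >> d
--         for k in range(1 << d):
--             out.append(sorted(numbers[k * w:(k + 1) * w]))
--     return out
-- ===== Notes on version B (the rewrite author's own statement) =====
-- stated objective: alternative
-- what changed: B fills the tree top-down with two nested range loops, computing every node directly as the sorted slice of the input it covers, instead of A's bottom-up layer sweep that two-pointer-merges the two child lists of each node.
import Mathlib
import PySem

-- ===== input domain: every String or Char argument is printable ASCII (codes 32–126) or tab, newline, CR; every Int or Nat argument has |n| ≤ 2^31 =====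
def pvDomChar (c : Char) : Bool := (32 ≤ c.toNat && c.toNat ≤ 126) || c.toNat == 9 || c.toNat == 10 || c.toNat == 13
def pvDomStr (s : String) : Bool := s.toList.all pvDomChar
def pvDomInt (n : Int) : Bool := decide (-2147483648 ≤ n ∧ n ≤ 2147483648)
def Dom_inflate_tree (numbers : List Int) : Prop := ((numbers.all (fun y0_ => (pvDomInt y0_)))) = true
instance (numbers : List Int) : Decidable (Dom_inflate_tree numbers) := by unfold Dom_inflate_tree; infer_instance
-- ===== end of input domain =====

-- B computes every node directly as the sorted slice it covers, instead of A's bottom-up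
-- pairwise merging; equivalence of return values is proved on nonempty inputs (A raises on []).

-- ===== PORT A =====
-- the inner two-pointer merge loop of A (appends into the initially empty node list),
-- transliterated as the obvious structural recursion over the same two cursors
def mergeA : List Int → List Int → List Int
  | [], e2 => e2
  | a :: e1, [] => a :: e1
  | a :: e1, b :: e2 => if a < b then a :: mergeA e1 (b :: e2) else b :: mergeA (a :: e1) e2

-- 'for i in range(end_layer): …' body of A's while loop; tree indices are provably
-- non-negative, so Python list indexing/assignment is List.getD / List.set exactly
def layerStepA (el : Nat) (t : List (List Int)) : List (List Int) :=
  (List.range el).foldl (fun t i =>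
    t.set (el + i) (mergeA (t.getD (2 * (el + i)) []) (t.getD (2 * (el + i) + 1) []))) t

-- 'while end_layer: … ; end_layer >>= 1'
def loopA (t : List (List Int)) (el : Nat) : List (List Int) :=
  if el = 0 then t else loopA (layerStepA el t) (el >>> 1)
termination_by el
decreasing_by simp only [Nat.shiftRight_succ, Nat.shiftRight_zero]; omega

def inflate_tree (numbers : List Int) : List (List Int) :=
  -- height = ceil(log2(len(numbers))): exact for n ≥ 1 (n = 0 raises, excluded by Pre_)
  let height := Nat.clog 2 numbers.length
  let endLayer := 1 <<< height
  let tree := List.replicate (2 <<< height) ([] : List Int)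
  let tree := (PySem.List.enumerate numbers 0).foldl
    (fun t se => t.set (endLayer + se.1.toNat) [se.2]) tree
  loopA tree (endLayer >>> 1)

-- ===== PORT B =====
def inflate_tree_alt (numbers : List Int) : List (List Int) :=
  let height := Nat.clog 2 numbers.length
  let size := 1 <<< height
  (List.range (height + 1)).foldl (fun out d =>
    let w := size >>> d
    (List.range (1 <<< d)).foldl (fun out k =>
      out ++ [PySem.List.sorted
        (PySem.List.slice numbers (some ((k * w : Nat) : Int)) (some (((k + 1) * w : Nat) : Int)))
        (fun x => x) false]) out)
    [[]]

-- ===== PRECONDITION & SPEC =====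
-- Pre_ excludes only the empty list, on which A raises ValueError (math domain error in log2)
def Pre_inflate_tree (numbers : List Int) : Prop := numbers ≠ []
instance (numbers : List Int) : Decidable (Pre_inflate_tree numbers) := by
  unfold Pre_inflate_tree; infer_instance
def pvWitness_inflate_tree : List Int := ([3, 1, 2] : List Int)

def Spec_inflate_tree (numbers : List Int) (out : List (List Int)) : Prop := out = inflate_tree_alt numbers
instance (numbers : List Int) (out : List (List Int)) : Decidable (Spec_inflate_tree numbers out) := by
  unfold Spec_inflate_tree; infer_instance

-- ===== CLAIM (what is proved, stated in full; the proofs are below) =====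
def Claim_equal_inflate_tree : Prop := ∀ (numbers : List Int), Dom_inflate_tree numbers → Pre_inflate_tree numbers → Spec_inflate_tree numbers (inflate_tree numbers)

-- ===== LEMMAS AND PROOFS =====

-- the ideal value of node v (E = 2^height): the sorted slice of numbers the node covers
def nodeF (numbers : List Int) (E : Nat) (v : Nat) : List Int :=
  if v = 0 then []
  else
    let d := Nat.log2 v
    let w := E / 2 ^ d
    PySem.List.sorted ((numbers.drop ((v - 2 ^ d) * w)).take w) (fun x => x) false

theorem log2_eq_of (d v : Nat) (h1 : 2 ^ d ≤ v) (h2 : v < 2 ^ (d + 1)) : Nat.log2 v = d := by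
  rw [Nat.log2_eq_log_two]
  exact Nat.log_eq_of_pow_le_of_lt_pow h1 h2

theorem mergeA_perm (a b : List Int) : (mergeA a b).Perm (a ++ b) := by
  fun_induction mergeA a b with
  | case1 e2 => simp
  | case2 a e1 => simp
  | case3 a e1 b e2 hlt ih =>
    simpa using ih.cons a
  | case4 a e1 b e2 hlt ih =>
    exact (ih.cons b).trans List.perm_middle.symm

theorem mergeA_pairwise (a b : List Int) (ha : a.Pairwise (· ≤ ·)) (hb : b.Pairwise (· ≤ ·)) :
    (mergeA a b).Pairwise (· ≤ ·) := by
  fun_induction mergeA a b with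
  | case1 e2 => exact hb
  | case2 a e1 => exact ha
  | case3 a e1 b e2 hlt ih =>
    rw [List.pairwise_cons] at ha ⊢
    refine ⟨?_, ih ha.2 hb⟩
    intro x hx
    rw [(mergeA_perm e1 (b :: e2)).mem_iff] at hx
    rcases List.mem_append.1 hx with h | h
    · exact ha.1 x h
    · rcases List.mem_cons.1 h with rfl | h
      · exact le_of_lt hlt
      · exact le_of_lt (lt_of_lt_of_le hlt ((List.pairwise_cons.1 hb).1 x h))
  | case4 a e1 b e2 hlt ih =>
    rw [List.pairwise_cons] at hb ⊢
    refine ⟨?_, ih ha hb.2⟩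
    intro x hx
    rw [(mergeA_perm (a :: e1) e2).mem_iff] at hx
    rcases List.mem_append.1 hx with h | h
    · rcases List.mem_cons.1 h with rfl | h
      · omega
      · exact le_trans (by omega) ((List.pairwise_cons.1 ha).1 x h)
    · exact hb.1 x h

theorem sorted_append_eq_mergeA (l1 l2 : List Int) :
    PySem.List.sorted (l1 ++ l2) (fun x => x) false =
      mergeA (PySem.List.sorted l1 (fun x => x) false) (PySem.List.sorted l2 (fun x => x) false) := by
  apply PySem.List.sorted_id_eq_of_perm_of_pairwise
  · exact (mergeA_perm _ _).trans
      ((PySem.List.sorted_perm l1 (fun x => x) false).append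
        (PySem.List.sorted_perm l2 (fun x => x) false))
  · exact mergeA_pairwise _ _
      (by simpa using PySem.List.sorted_pairwise l1 (fun x => x))
      (by simpa using PySem.List.sorted_pairwise l2 (fun x => x))

theorem nodeF_leaf (numbers : List Int) (h E v : Nat) (hE : E = 2 ^ h)
    (h1 : E ≤ v) (h2 : v < 2 * E) :
    nodeF numbers E v = ((numbers.drop (v - E)).take 1) := by
  have hE1 : 1 ≤ E := hE ▸ Nat.one_le_two_pow
  have hv0 : v ≠ 0 := by omega
  have hd : Nat.log2 v = h := by
    refine log2_eq_of h v (by omega) ?_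
    have : 2 ^ (h + 1) = 2 * 2 ^ h := by ring
    omega
  unfold nodeF
  rw [if_neg hv0]
  have hds : (2:Nat) ^ h / 2 ^ h = 1 := Nat.div_self (Nat.two_pow_pos h)
  simp only [hd, hE, hds, mul_one]
  apply PySem.List.sorted_eq_self_of_pairwise
  have hlen : ((numbers.drop (v - 2 ^ h)).take 1).length ≤ 1 := by
    simp
  rcases hl : (numbers.drop (v - 2 ^ h)).take 1 with _ | ⟨x, _ | ⟨y, t⟩⟩
  · exact List.Pairwise.nil
  · simp
  · rw [hl] at hlen; simp at hlen

theorem nodeF_merge (numbers : List Int) (h E v : Nat) (hE : E = 2 ^ h)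
    (h1 : 1 ≤ v) (h2 : v < E) :
    nodeF numbers E v = mergeA (nodeF numbers E (2 * v)) (nodeF numbers E (2 * v + 1)) := by
  have hv0 : v ≠ 0 := by omega
  set d := Nat.log2 v with hd
  have hdle : 2 ^ d ≤ v := Nat.log2_self_le hv0
  have hdlt : v < 2 ^ (d + 1) := Nat.lt_log2_self
  have hdh : d < h := by
    have : 2 ^ d < 2 ^ h := by omega
    exact (Nat.pow_lt_pow_iff_right (by omega)).1 this
  have hp1 : 2 ^ (d + 1) = 2 * 2 ^ d := by ring
  have hp2 : 2 ^ (d + 2) = 2 * 2 ^ (d + 1) := by ring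
  have hdl : Nat.log2 (2 * v) = d + 1 := log2_eq_of _ _ (by omega) (by omega)
  have hdr : Nat.log2 (2 * v + 1) = d + 1 := log2_eq_of _ _ (by omega) (by omega)
  have hw : E / 2 ^ d = 2 ^ (h - d) := by
    rw [hE]; exact Nat.pow_div hdh.le (by omega)
  have hw' : E / 2 ^ (d + 1) = 2 ^ (h - d - 1) := by
    rw [hE]; exact Nat.pow_div (by omega) (by omega)
  have hww : 2 ^ (h - d) = 2 ^ (h - d - 1) + 2 ^ (h - d - 1) := by
    have hs : 2 ^ (h - d) = 2 ^ (h - d - 1) * 2 := by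
      rw [← pow_succ]; congr 1; omega
    omega
  unfold nodeF
  rw [if_neg hv0, if_neg (by omega : ¬ 2 * v = 0), if_neg (by omega : ¬ 2 * v + 1 = 0)]
  simp only [hdl, hdr, ← hd, hw, hw']
  rw [← sorted_append_eq_mergeA]
  congr 1
  have hk1 : 2 * v - 2 ^ (d + 1) = 2 * (v - 2 ^ d) := by omega
  have hk2 : 2 * v + 1 - 2 ^ (d + 1) = 2 * (v - 2 ^ d) + 1 := by omega
  rw [hk1, hk2, hww, List.take_add, List.drop_drop]
  have e1 : (v - 2 ^ d) * (2 ^ (h - d - 1) + 2 ^ (h - d - 1)) = 2 * (v - 2 ^ d) * 2 ^ (h - d - 1) := by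
    ring
  have e2 : 2 * (v - 2 ^ d) * 2 ^ (h - d - 1) + 2 ^ (h - d - 1)
      = (2 * (v - 2 ^ d) + 1) * 2 ^ (h - d - 1) := by ring
  rw [e1, e2]

-- a fold of in-place updates preserves the length
theorem foldl_set_length {α ι : Type} (xs : List ι)
    (pos : List α → ι → Nat) (val : List α → ι → α) :
    ∀ t : List α, (xs.foldl (fun t i => t.set (pos t i) (val t i)) t).length = t.length := by
  induction xs with
  | nil => intro t; rfl
  | cons x xs ih => intro t; rw [List.foldl_cons, ih, List.length_set]

-- the leaf-setting fold of A, characterised pointwise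
theorem leavesA_getD (E : Nat) :
    ∀ (numbers : List Int) (s : Nat) (t : List (List Int)),
      E + s + numbers.length ≤ t.length → ∀ v : Nat,
      ((PySem.List.enumerate numbers (s : Int)).foldl
          (fun t se => t.set (E + se.1.toNat) [se.2]) t).getD v []
        = if E + s ≤ v ∧ v < E + s + numbers.length
            then [numbers.getD (v - E - s) 0] else t.getD v [] := by
  intro numbers
  induction numbers with
  | nil =>
    intro s t hlen v
    rw [if_neg (by simp)]
    rfl
  | cons x xs ih =>
    intro s t hlen v
    have hcast : ((s : Int)) + 1 = (((s + 1 : Nat)) : Int) := by push_cast; ring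
    rw [PySem.List.enumerate_cons, List.foldl_cons, hcast]
    have hsl : E + s < t.length := by simp at hlen; omega
    have hlen' : E + (s + 1) + xs.length ≤ (t.set (E + (s : Int).toNat) [x]).length := by
      rw [List.length_set]; simp at hlen ⊢; omega
    rw [ih (s + 1) _ hlen' v]
    simp only [Int.toNat_natCast]
    by_cases hv1 : E + (s + 1) ≤ v ∧ v < E + (s + 1) + xs.length
    · rw [if_pos hv1, if_pos (by simp; omega)]
      have : v - E - s = (v - E - (s + 1)) + 1 := by omega
      rw [this]
      rfl
    · rw [if_neg hv1]
      by_cases hv2 : v = E + s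
      · subst hv2
        rw [if_pos (by simp)]
        rw [List.getD_eq_getElem?_getD, List.getElem?_set, if_pos rfl, if_pos hsl]
        simp
      · rw [if_neg (by simp at hv1 ⊢; omega)]
        rw [List.getD_eq_getElem?_getD, List.getElem?_set, if_neg (by omega),
          ← List.getD_eq_getElem?_getD]

theorem layer_foldl_getD (el : Nat) :
    ∀ (k : Nat), k ≤ el → ∀ (t : List (List Int)), 2 * el ≤ t.length → ∀ v : Nat,
      ((List.range k).foldl (fun t i =>
          t.set (el + i) (mergeA (t.getD (2 * (el + i)) []) (t.getD (2 * (el + i) + 1) []))) t).getD v []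
        = if el ≤ v ∧ v < el + k
            then mergeA (t.getD (2 * v) []) (t.getD (2 * v + 1) []) else t.getD v [] := by
  intro k
  induction k with
  | zero =>
    intro _ t _ v
    rw [if_neg (by omega)]
    rfl
  | succ k ih =>
    intro hk t hlen v
    rw [List.range_succ, List.foldl_append, List.foldl_cons, List.foldl_nil]
    set body := fun (t : List (List Int)) (i : Nat) =>
      t.set (el + i) (mergeA (t.getD (2 * (el + i)) []) (t.getD (2 * (el + i) + 1) [])) with hbody
    have hprevlen : ((List.range k).foldl body t).length = t.length := by
      rw [hbody]
      exact foldl_set_length (List.range k) (fun t i => el + i)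
        (fun t i => mergeA (t.getD (2 * (el + i)) []) (t.getD (2 * (el + i) + 1) [])) t
    have ihk := ih (by omega) t hlen
    have hr1 : ((List.range k).foldl body t).getD (2 * (el + k)) [] = t.getD (2 * (el + k)) [] := by
      rw [ihk (2 * (el + k)), if_neg (by omega)]
    have hr2 : ((List.range k).foldl body t).getD (2 * (el + k) + 1) []
        = t.getD (2 * (el + k) + 1) [] := by
      rw [ihk (2 * (el + k) + 1), if_neg (by omega)]
    show (body _ k).getD v [] = _
    rw [hbody]
    simp only []
    by_cases hv : v = el + k
    · subst hv
      rw [List.getD_eq_getElem?_getD, List.getElem?_set, if_pos rfl,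
        if_pos (by rw [hprevlen]; omega)]
      rw [hr1, hr2, if_pos (by omega)]
      rfl
    · rw [List.getD_eq_getElem?_getD, List.getElem?_set, if_neg (by omega),
        ← List.getD_eq_getElem?_getD, ihk v]
      by_cases hvv : el ≤ v ∧ v < el + k
      · rw [if_pos hvv, if_pos (by omega)]
      · rw [if_neg hvv, if_neg (by omega)]

theorem layerStepA_length (el : Nat) (t : List (List Int)) :
    (layerStepA el t).length = t.length := by
  unfold layerStepA
  exact foldl_set_length (List.range el) (fun t i => el + i)
    (fun t i => mergeA (t.getD (2 * (el + i)) []) (t.getD (2 * (el + i) + 1) [])) t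

theorem loopA_zero (t : List (List Int)) : loopA t 0 = t := by
  rw [loopA]; simp

theorem loopA_pow (numbers : List Int) (h' E : Nat) (hE : E = 2 ^ h') :
    ∀ (j : Nat) (t : List (List Int)), 2 ^ (j + 1) ≤ E → t.length = 2 * E →
      (∀ v : Nat, v < 2 * E → (2 ^ (j + 1) ≤ v ∨ v = 0) → t.getD v [] = nodeF numbers E v) →
      ∀ v : Nat, v < 2 * E → (loopA t (2 ^ j)).getD v [] = nodeF numbers E v := by
  intro j
  induction j with
  | zero =>
    intro t hE2 hlen hvals v hv
    rw [pow_zero, loopA, if_neg (by omega)]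
    have h10 : (1 : Nat) >>> 1 = 0 := rfl
    rw [h10, loopA_zero]
    show (layerStepA 1 t).getD v [] = _
    unfold layerStepA
    rw [layer_foldl_getD 1 1 (le_refl 1) t (by omega) v]
    have hE2' : 2 ≤ E := by simpa using hE2
    by_cases hv1 : v = 1
    · subst hv1
      rw [if_pos (by omega)]
      rw [hvals 2 (by omega) (by omega), hvals 3 (by omega) (by omega)]
      exact (nodeF_merge numbers h' E 1 hE (by omega) (by omega)).symm
    · rw [if_neg (by omega)]
      rcases Nat.eq_zero_or_pos v with h0 | h1
      · exact hvals v hv (Or.inr h0)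
      · exact hvals v hv (Or.inl (by omega))
  | succ j ih =>
    intro t hE2 hlen hvals v hv
    have hp2 : (2 : Nat) ^ (j + 2) = 2 * 2 ^ (j + 1) := by ring
    have hp1 : (2 : Nat) ^ (j + 1) = 2 * 2 ^ j := by ring
    have hone : (1 : Nat) ≤ 2 ^ (j + 1) := Nat.one_le_two_pow
    rw [loopA, if_neg (by omega)]
    have hsh : (2 : Nat) ^ (j + 1) >>> 1 = 2 ^ j := by
      rw [Nat.shiftRight_eq_div_pow, pow_one, hp1, Nat.mul_div_cancel_left _ (by omega)]
    rw [hsh]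
    refine ih (layerStepA (2 ^ (j + 1)) t) (by omega) (by rw [layerStepA_length]; omega) ?_ v hv
    intro u hu hcase
    unfold layerStepA
    rw [layer_foldl_getD (2 ^ (j + 1)) (2 ^ (j + 1)) (le_refl _) t (by omega) u]
    rcases hcase with hge | h0
    · by_cases hlt : u < 2 ^ (j + 1) + 2 ^ (j + 1)
      · rw [if_pos (by omega)]
        rw [hvals (2 * u) (by omega) (by omega), hvals (2 * u + 1) (by omega) (by omega)]
        exact (nodeF_merge numbers h' E u hE (by omega) (by omega)).symm
      · rw [if_neg (by omega)]
        exact hvals u hu (Or.inl (by omega))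
    · subst h0
      rw [if_neg (by omega)]
      exact hvals 0 hu (Or.inr rfl)

theorem loopA_length (el : Nat) : ∀ t : List (List Int), (loopA t el).length = t.length := by
  induction el using Nat.strong_induction_on with
  | _ el ih =>
    intro t
    rw [loopA]
    split
    · rfl
    · next h =>
      rw [ih (el >>> 1) (by rw [Nat.shiftRight_eq_div_pow, pow_one]; omega), layerStepA_length]

theorem take_one_drop (l : List Int) (i : Nat) (h : i < l.length) :
    (l.drop i).take 1 = [l.getD i 0] := by
  rw [List.drop_eq_getElem_cons h, List.take_succ_cons, List.take_zero, List.getD_eq_getElem l 0 h]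

-- the tree after A's leaf-setting phase agrees with nodeF on layer indices v ≥ E and at 0
theorem leaves_nodeF (numbers : List Int) (h' E : Nat) (hE : E = 2 ^ h')
    (_hn : 1 ≤ numbers.length) (hnE : numbers.length ≤ E) (v : Nat) (hv : v < 2 * E)
    (hcase : E ≤ v ∨ v = 0) :
    ((PySem.List.enumerate numbers ((0 : Nat) : Int)).foldl
        (fun t se => t.set (E + se.1.toNat) [se.2])
        (List.replicate (2 * E) ([] : List Int))).getD v [] = nodeF numbers E v := by
  rw [leavesA_getD E numbers 0 _ (by rw [List.length_replicate]; omega) v]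
  have hE1 : 1 ≤ E := by rw [hE]; exact Nat.one_le_two_pow
  rcases hcase with hge | h0
  · by_cases hlt : v < E + numbers.length
    · rw [if_pos (by omega), nodeF_leaf numbers h' E v hE (by omega) (by omega),
        take_one_drop numbers (v - E) (by omega)]
      simp
    · rw [if_neg (by omega), nodeF_leaf numbers h' E v hE (by omega) (by omega)]
      rw [List.drop_eq_nil_of_le (by omega), List.take_nil]
      simp
  · subst h0
    rw [if_neg (by omega)]
    unfold nodeF
    rw [if_pos rfl]
    simp

theorem A_length (numbers : List Int) (_hne : numbers ≠ []) :
    (inflate_tree numbers).length = 2 * 2 ^ Nat.clog 2 numbers.length := by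
  simp only [inflate_tree, Nat.shiftLeft_eq, one_mul]
  rw [loopA_length]
  rw [foldl_set_length (PySem.List.enumerate numbers 0)
    (fun t se => 2 ^ Nat.clog 2 numbers.length + se.1.toNat) (fun t se => [se.2])]
  rw [List.length_replicate]

theorem A_getD (numbers : List Int) (hne : numbers ≠ []) :
    ∀ v : Nat, v < 2 * 2 ^ Nat.clog 2 numbers.length →
      (inflate_tree numbers).getD v [] = nodeF numbers (2 ^ Nat.clog 2 numbers.length) v := by
  intro v hv
  have hn : 1 ≤ numbers.length := List.length_pos_iff.2 hne
  have hnE : numbers.length ≤ 2 ^ Nat.clog 2 numbers.length :=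
    Nat.le_pow_clog (by omega) numbers.length
  simp only [inflate_tree, Nat.shiftLeft_eq, one_mul]
  have hrep : (2 : Nat) * 2 ^ Nat.clog 2 numbers.length = 2 * 2 ^ Nat.clog 2 numbers.length := rfl
  rcases hcl : Nat.clog 2 numbers.length with _ | j
  · -- height 0, E = 1: the while loop does not run
    rw [hcl] at hv hnE
    have hsh : (2 : Nat) ^ 0 >>> 1 = 0 := rfl
    rw [hsh, loopA_zero]
    exact leaves_nodeF numbers 0 (2 ^ 0) rfl hn hnE v hv (by simp at hv ⊢; omega)
  · rw [hcl] at hv hnE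
    have hsh : (2 : Nat) ^ (j + 1) >>> 1 = 2 ^ j := by
      rw [Nat.shiftRight_eq_div_pow, pow_one, pow_succ, Nat.mul_div_cancel _ (by omega)]
    rw [hsh]
    refine loopA_pow numbers (j + 1) (2 ^ (j + 1)) rfl j _ (le_refl _)
      (by rw [foldl_set_length (PySem.List.enumerate numbers 0)
        (fun t se => 2 ^ (j + 1) + se.1.toNat) (fun t se => [se.2]), List.length_replicate]) ?_ v hv
    intro u hu hcase
    exact leaves_nodeF numbers (j + 1) (2 ^ (j + 1)) rfl hn hnE u hu
      (by rcases hcase with h | h <;> omega)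

-- B unfolded to a flat list of layers
theorem B_eq_flat (numbers : List Int) :
    inflate_tree_alt numbers
      = [[]] ++ (List.range (Nat.clog 2 numbers.length + 1)).flatMap (fun d =>
          (List.range (2 ^ d)).map (fun k =>
            PySem.List.sorted
              ((numbers.drop (k * (2 ^ Nat.clog 2 numbers.length / 2 ^ d))).take
                (2 ^ Nat.clog 2 numbers.length / 2 ^ d))
              (fun x => x) false)) := by
  simp only [inflate_tree_alt, Nat.shiftLeft_eq, one_mul, Nat.shiftRight_eq_div_pow,
    PySem.List.foldl_append_singleton_eq_map, PySem.List.foldl_append_eq_flatMap,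
    PySem.List.slice_natCast, add_one_mul, Nat.add_sub_cancel_left]

theorem sumRangePow (n : Nat) : ((List.range n).map (fun d => 2 ^ d)).sum = 2 ^ n - 1 := by
  induction n with
  | zero => rfl
  | succ n ih =>
    rw [List.range_succ, List.map_append, List.sum_append, ih]
    have := Nat.one_le_two_pow (n := n)
    simp [pow_succ]; omega

-- length and pointwise description of the layered list [[]] ++ layer 0 ++ layer 1 ++ …
theorem layers_length (node : Nat → Nat → List Int) (j : Nat) :
    ([[]] ++ (List.range j).flatMap (fun d => (List.range (2 ^ d)).map (node d))).length
      = 2 ^ j := by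
  have hs := sumRangePow j
  have h1 : (1 : Nat) ≤ 2 ^ j := Nat.one_le_two_pow
  simp only [List.length_append, List.length_flatMap, List.length_map, List.length_range]
  have : (List.map ((fun l : List (List Int) => l.length) ∘ fun d =>
      (List.range (2 ^ d)).map (node d)) (List.range j)).sum
      = ((List.range j).map (fun d => 2 ^ d)).sum := by
    congr 1
    apply List.map_congr_left
    intro d _
    simp
  simp at this ⊢
  omega

theorem layers_getElem? (node : Nat → Nat → List Int) :
    ∀ (j v : Nat), v < 2 ^ j →
      ([[]] ++ (List.range j).flatMap (fun d => (List.range (2 ^ d)).map (node d)))[v]?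
        = some (if v = 0 then [] else node (Nat.log2 v) (v - 2 ^ Nat.log2 v)) := by
  intro j
  induction j with
  | zero =>
    intro v hv
    have : v = 0 := by simpa using hv
    subst this
    rfl
  | succ j ih =>
    intro v hv
    rw [List.range_succ, List.flatMap_append, ← List.append_assoc]
    by_cases hlt : v < 2 ^ j
    · rw [List.getElem?_append_left (by rw [layers_length]; omega), ih v hlt]
    · have hj1 : 2 ^ (j + 1) = 2 * 2 ^ j := by ring
      have h1 : (1 : Nat) ≤ 2 ^ j := Nat.one_le_two_pow
      rw [List.getElem?_append_right (by rw [layers_length]; omega), layers_length]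
      simp only [List.flatMap_cons, List.flatMap_nil, List.append_nil]
      rw [List.getElem?_map, List.getElem?_range (by omega)]
      have hlog : Nat.log2 v = j := log2_eq_of j v (by omega) (by omega)
      rw [if_neg (by omega), hlog]
      rfl

theorem B_length (numbers : List Int) :
    (inflate_tree_alt numbers).length = 2 * 2 ^ Nat.clog 2 numbers.length := by
  rw [B_eq_flat, layers_length]
  have : 2 ^ (Nat.clog 2 numbers.length + 1) = 2 * 2 ^ Nat.clog 2 numbers.length := by ring
  omega

theorem B_getD (numbers : List Int) :
    ∀ v : Nat, v < 2 * 2 ^ Nat.clog 2 numbers.length →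
      (inflate_tree_alt numbers).getD v [] = nodeF numbers (2 ^ Nat.clog 2 numbers.length) v := by
  intro v hv
  have hv' : v < 2 ^ (Nat.clog 2 numbers.length + 1) := by
    have : 2 ^ (Nat.clog 2 numbers.length + 1) = 2 * 2 ^ Nat.clog 2 numbers.length := by ring
    omega
  rw [B_eq_flat, List.getD_eq_getElem?_getD,
    layers_getElem? _ (Nat.clog 2 numbers.length + 1) v hv']
  unfold nodeF
  rfl

-- ===== VERDICT (by name: the statement is the Claim_ definition above) =====
theorem inflate_tree_spec : Claim_equal_inflate_tree := by
  intro numbers _ hne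
  unfold Spec_inflate_tree
  have hal := A_length numbers hne
  have hbl := B_length numbers
  apply List.ext_getElem (by rw [hal, hbl])
  intro i h1 h2
  have hi : i < 2 * 2 ^ Nat.clog 2 numbers.length := by rw [← hal]; exact h1
  have ha := A_getD numbers hne i hi
  have hb := B_getD numbers i hi
  rw [List.getD_eq_getElem?_getD, List.getElem?_eq_getElem h1] at ha
  rw [List.getD_eq_getElem?_getD, List.getElem?_eq_getElem h2] at hb
  simpa using ha.trans hb.symm
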